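-- pv_equiv track=rewrite | github.com/cardimgame/MysticRealm | tools/cleanup_mysticrealm.py | _map_module
-- ===== SOURCE A (Python) =====
-- from typing import Dict, Iterable, List, Optional, Tuple
--
-- MODULE_MAP: Dict[str, Optional[str]] = {
--     "systems.savegame": "systems.save_load",
--     "ui.save_select": None,  # sem substituto direto
-- }
--
-- def _map_module(name: str) -> Optional[str]:
--     # name: 'systems.savegame' ou 'systems'
--     if name in MODULE_MAP:
--         return MODULE_MAP[name]
--     # se for submódulo de alvo (ex.: systems.savegame.xyz) → substitui prefixo
--     for old in MODULE_MAP: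
--         if name.startswith(old + ".") and MODULE_MAP[old]:
--             new = MODULE_MAP[old] + name[len(old):]
--             return new
--     return name  # sem mudança
-- ===== SOURCE B (Python) =====
-- from typing import Dict, Optional
--
-- MODULE_MAP: Dict[str, Optional[str]] = {
--     "systems.savegame": "systems.save_load",
--     "ui.save_select": None,  # sem substituto direto
-- }
--
-- def _map_module(name: str) -> Optional[str]:
--     if name in MODULE_MAP:
--         return MODULE_MAP[name]
--     # walk the name's own dot boundaries, longest prefix first, with direct lookups
--     for cut in range(len(name) - 1, -1, -1):
--         if name[cut] == ".":
--             repl = MODULE_MAP.get(name[:cut])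
--             if repl:
--                 return repl + name[cut:]
--     return name
-- ===== Notes on version B (the rewrite author's own statement) =====
-- stated objective: alternative
-- what changed: Instead of scanning every MODULE_MAP key with startswith, B keeps the exact-match check and then walks the name's own dot boundaries from the longest prefix down, doing a direct dict lookup per candidate prefix.
import Mathlib
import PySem

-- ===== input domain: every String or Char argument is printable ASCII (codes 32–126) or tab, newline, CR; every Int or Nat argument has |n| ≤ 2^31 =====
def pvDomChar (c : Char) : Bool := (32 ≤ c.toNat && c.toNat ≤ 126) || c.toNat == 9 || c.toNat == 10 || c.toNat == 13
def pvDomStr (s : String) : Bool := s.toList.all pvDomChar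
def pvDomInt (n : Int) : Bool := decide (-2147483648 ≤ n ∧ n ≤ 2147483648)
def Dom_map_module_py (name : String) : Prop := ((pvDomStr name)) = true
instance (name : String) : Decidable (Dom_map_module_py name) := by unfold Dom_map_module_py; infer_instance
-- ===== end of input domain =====

-- B replaces A's scan of every map key with a walk over the name's own dot
-- boundaries (longest prefix first) using direct dict lookups; objective: alternative.

-- ===== PORT A =====
-- MODULE_MAP = {"systems.savegame": "systems.save_load", "ui.save_select": None}
def pvMODULE_MAP : PySem.Dict String (Option String) :=
  (PySem.Dict.empty.insert "systems.savegame" (some "systems.save_load")).insert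
    "ui.save_select" none

-- Python truthiness of an Optional[str]: None and "" are falsy
def pvOptTruthy : Option String → Bool
  | some s => !(s == "")
  | none => false

-- the 'for old in MODULE_MAP:' loop of A, over the dict's keys in insertion order
def pvALoop (name : String) : List String → Option String
  | [] => some name                    -- fall through the loop: 'return name'
  | old :: rest =>
    if PySem.Str.startswith name (old ++ ".") && pvOptTruthy (pvMODULE_MAP.getD old none) then
      some ((pvMODULE_MAP.getD old none).getD "" ++
        PySem.Str.slice name (some (PySem.Str.len old)) none)   -- MODULE_MAP[old] + name[len(old):]
    else pvALoop name rest

def map_module_py (name : String) : Option String :=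
  match pvMODULE_MAP.get? name with    -- 'if name in MODULE_MAP: return MODULE_MAP[name]'
  | some v => v
  | none => pvALoop name pvMODULE_MAP.keys

-- ===== PORT B =====
-- the 'for cut in range(len(name)-1, -1, -1):' loop of B; pvBScan cs (n+1) examines
-- index n first, then recurses downward; 'some r' is the loop's early return.
-- cs.take n / cs.drop n are exactly Python's name[:cut] / name[cut:] since 0 ≤ cut < len(name) here.
def pvBScan (cs : List Char) : Nat → Option String
  | 0 => none
  | n + 1 =>
    if cs[n]? = some '.' then
      match pvMODULE_MAP.getD (String.ofList (cs.take n)) none with  -- MODULE_MAP.get(name[:cut])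
      | some repl => if repl == "" then pvBScan cs n
                     else some (repl ++ String.ofList (cs.drop n))   -- 'if repl: return repl + name[cut:]'
      | none => pvBScan cs n
    else pvBScan cs n

def map_module_py_alt (name : String) : Option String :=
  match pvMODULE_MAP.get? name with    -- same exact-match check as A
  | some v => v
  | none =>
    match pvBScan name.toList name.toList.length with
    | some r => some r
    | none => some name                -- loop finished: 'return name'

-- ===== PRECONDITION & SPEC =====
def Spec_map_module_py (name : String) (out : Option String) : Prop := out = map_module_py_alt name
instance (name : String) (out : Option String) : Decidable (Spec_map_module_py name out) := by unfold Spec_map_module_py; infer_instance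

-- ===== CLAIM (what is proved, stated in full; the proofs are below) =====
def Claim_equal_map_module_py : Prop := ∀ (name : String), Dom_map_module_py name → Spec_map_module_py name (map_module_py name)

-- ===== LEMMAS AND PROOFS =====

-- classify the concrete two-entry dict's .get (getD · none)
theorem pvGetD_cases (s : String) :
    pvMODULE_MAP.getD s none =
      if s = "ui.save_select" then none
      else if s = "systems.savegame" then some "systems.save_load"
      else none := by
  simp [pvMODULE_MAP, PySem.Dict.getD_insert, PySem.Dict.getD_empty]

-- 'name starts with "systems.savegame."' as a take/index condition
theorem pvStartswith_iff (cs : List Char) :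
    PySem.Chars.startswith cs ("systems.savegame.".toList) = true ↔
      cs.take 16 = "systems.savegame".toList ∧ cs[16]? = some '.' := by
  rw [PySem.Chars.startswith_iff, List.prefix_iff_eq_take]
  have hlen : ("systems.savegame.".toList).length = 17 := rfl
  rw [hlen]
  constructor
  · intro h
    have h17 : cs.take 17 = "systems.savegame".toList ++ ['.'] := h.symm
    constructor
    · have := congrArg (List.take 16) h17
      simpa [List.take_take] using this
    · have := congrArg (fun l => l[16]?) h17
      simpa [List.getElem?_take] using this
  · rintro ⟨h1, h2⟩
    have : cs.take 17 = cs.take 16 ++ (cs[16]?).toList := List.take_add_one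
    rw [this, h1, h2]
    rfl

-- what B's scan computes
theorem pvBScan_eq (cs : List Char) (n : Nat) :
    pvBScan cs n =
      if cs.take 16 = "systems.savegame".toList ∧ cs[16]? = some '.' ∧ 16 < n
      then some ("systems.save_load" ++ String.ofList (cs.drop 16))
      else none := by
  induction n with
  | zero => simp [pvBScan]
  | succ n ih =>
    rw [pvBScan]
    by_cases hdot : cs[n]? = some '.'
    · have hn : n < cs.length := by
        rcases List.getElem?_eq_some_iff.mp hdot with ⟨h, _⟩; exact h
      rw [if_pos hdot, pvGetD_cases]
      by_cases hk1 : String.ofList (cs.take n) = "systems.savegame"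
      · have htl : cs.take n = "systems.savegame".toList := by
          have := congrArg String.toList hk1; simpa using this
        have hn16 : n = 16 := by
          have := congrArg List.length htl
          simp [List.length_take] at this
          omega
        subst hn16
        have hk2 : ¬ (String.ofList (cs.take 16) = "ui.save_select") := by
          rw [hk1]; decide
        rw [if_neg hk2, if_pos hk1]
        have : ¬ (("systems.save_load" : String) == "") = true := by decide
        simp only [this, if_false, Bool.false_eq_true]
        rw [if_pos ⟨htl, hdot, by omega⟩]
      · -- the examined prefix is not the one truthy key: recurse
        have hrec : pvBScan cs n =
            if cs.take 16 = "systems.savegame".toList ∧ cs[16]? = some '.' ∧ 16 < n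
            then some ("systems.save_load" ++ String.ofList (cs.drop 16)) else none := ih
        have hcond : (cs.take 16 = "systems.savegame".toList ∧ cs[16]? = some '.' ∧ 16 < n + 1) ↔
            (cs.take 16 = "systems.savegame".toList ∧ cs[16]? = some '.' ∧ 16 < n) := by
          constructor
          · rintro ⟨h1, h2, h3⟩
            refine ⟨h1, h2, ?_⟩
            rcases Nat.lt_or_ge 16 n with h | h
            · exact h
            · exfalso
              have hn16 : n = 16 := by omega
              subst hn16
              apply hk1
              rw [h1]; rfl
          · rintro ⟨h1, h2, h3⟩; exact ⟨h1, h2, by omega⟩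
        by_cases hk2 : String.ofList (cs.take n) = "ui.save_select"
        · rw [if_pos hk2, hrec, if_congr hcond rfl rfl]
        · rw [if_neg hk2, if_neg hk1, hrec, if_congr hcond rfl rfl]
    · rw [if_neg hdot]
      rw [ih]
      apply if_congr _ rfl rfl
      constructor
      · rintro ⟨h1, h2, h3⟩; exact ⟨h1, h2, by omega⟩
      · rintro ⟨h1, h2, h3⟩
        refine ⟨h1, h2, ?_⟩
        rcases Nat.lt_or_ge 16 n with h | h
        · exact h
        · exfalso; have hn16 : n = 16 := by omega
          rw [hn16] at hdot; exact hdot h2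

-- the success value A builds equals the one B builds
theorem pvValue_eq (name : String) :
    ("systems.save_load" ++ PySem.Str.slice name (some (PySem.Str.len "systems.savegame")) none : String) =
      "systems.save_load" ++ String.ofList (name.toList.drop 16) := by
  have h : PySem.Str.slice name (some (PySem.Str.len "systems.savegame")) none =
      String.ofList (name.toList.drop 16) := by
    have hlen : PySem.Str.len "systems.savegame" = (16 : Int) := by decide
    rw [hlen]
    have := congrArg String.ofList (PySem.Str.toList_slice name (some 16) none)
    rw [String.ofList_toList] at this
    rw [this]
    congr 1
    rw [PySem.Chars.slice_eq_listSlice, PySem.List.slice_from name.toList (by norm_num)]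
    rfl
  rw [h]

-- ===== VERDICT (by name: the statement is the Claim_ definition above) =====
theorem map_module_py_spec : Claim_equal_map_module_py := by
  intro name _
  unfold Spec_map_module_py map_module_py map_module_py_alt
  cases hget : pvMODULE_MAP.get? name with
  | some v => rfl
  | none =>
    have hkeys : pvMODULE_MAP.keys = ["systems.savegame", "ui.save_select"] := by decide
    rw [hkeys]
    rw [pvBScan_eq]
    have hstart : PySem.Str.startswith name ("systems.savegame" ++ ".") =
        PySem.Chars.startswith name.toList ("systems.savegame.".toList) := by
      rw [PySem.Str.startswith_eq]; rfl
    by_cases hS : PySem.Chars.startswith name.toList ("systems.savegame.".toList) = true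
    · obtain ⟨h1, h2⟩ := (pvStartswith_iff name.toList).mp hS
      have h3 : 16 < name.toList.length := by
        rcases List.getElem?_eq_some_iff.mp h2 with ⟨h, _⟩; exact h
      rw [if_pos ⟨h1, h2, h3⟩]
      simp only [pvALoop]
      rw [hstart, hS]
      have htruthy : pvOptTruthy (pvMODULE_MAP.getD "systems.savegame" none) = true := by decide
      rw [htruthy]
      simp only [Bool.and_self, if_true]
      have hval : (pvMODULE_MAP.getD "systems.savegame" none).getD "" = "systems.save_load" := by decide
      rw [hval, pvValue_eq]
    · have hS' : PySem.Chars.startswith name.toList ("systems.savegame.".toList) = false :=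
        Bool.eq_false_iff.mpr hS
      have hcond : ¬ (name.toList.take 16 = "systems.savegame".toList ∧
          name.toList[16]? = some '.' ∧ 16 < name.toList.length) := by
        rintro ⟨h1, h2, _⟩
        exact hS ((pvStartswith_iff name.toList).mpr ⟨h1, h2⟩)
      rw [if_neg hcond]
      simp only [pvALoop]
      rw [hstart, hS']
      have hfalsy : pvOptTruthy (pvMODULE_MAP.getD "ui.save_select" none) = false := by decide
      rw [hfalsy]
      simp
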